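-- pv_equiv track=rewrite | github.com/nlapalu/SDDetector | SDDetector/Utils/EffectPredictor.py | extractVariantFromAlignment
-- ===== SOURCE A (Python) =====
-- def extractVariantFromAlignment(seq1,seq2):
--     """def
--
--         Sequence analyzed only on CDS part.
--         If gene splitting, the CDS part is analyzed in
--         case of a symetric CDS
--     """
--
--     nbSNPs = 0
--     nbInDels = 0
--     seq1PreviousNt = None
--     seq2PreviousNt = None
--     for i in range(0, len(seq1)):
--         if seq1[i] != seq2[i] and seq1[i] != '.' and seq2[i] != '.':
--             nbSNPs += 1
--         if seq1[i] == '.' and seq1PreviousNt != '.':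
--             nbInDels += 1
--         if seq2[i] == '.' and seq2PreviousNt != '.':
--             nbInDels += 1
--         seq1PreviousNt = seq1[i]
--         seq2PreviousNt = seq2[i]
--
--     return (nbSNPs,nbInDels)
-- ===== SOURCE B (Python) =====
-- def _indelRuns(s):
--     """Number of maximal runs of '.' in s, by jumping over each run."""
--     n = 0
--     i = 0
--     L = len(s)
--     while i < L:
--         if s[i] == '.':
--             n += 1
--             while i < L and s[i] == '.':
--                 i += 1
--         else:
--             i += 1
--     return n
--
--
-- def extractVariantFromAlignment(seq1, seq2):
--     nbSNPs = sum(1 for i in range(len(seq1))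
--                  if seq1[i] != seq2[i] and seq1[i] != '.' and seq2[i] != '.')
--     return (nbSNPs, _indelRuns(seq1) + _indelRuns(seq2[:len(seq1)]))
-- ===== Notes on version B (the rewrite author's own statement) =====
-- stated objective: alternative
-- what changed: Replaces A's single fused loop carrying previous-character registers for both sequences by a separate SNP-counting pass and a per-sequence run counter that jumps over each maximal '.'-run with an inner skip loop (no previous-character state).
import Mathlib
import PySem

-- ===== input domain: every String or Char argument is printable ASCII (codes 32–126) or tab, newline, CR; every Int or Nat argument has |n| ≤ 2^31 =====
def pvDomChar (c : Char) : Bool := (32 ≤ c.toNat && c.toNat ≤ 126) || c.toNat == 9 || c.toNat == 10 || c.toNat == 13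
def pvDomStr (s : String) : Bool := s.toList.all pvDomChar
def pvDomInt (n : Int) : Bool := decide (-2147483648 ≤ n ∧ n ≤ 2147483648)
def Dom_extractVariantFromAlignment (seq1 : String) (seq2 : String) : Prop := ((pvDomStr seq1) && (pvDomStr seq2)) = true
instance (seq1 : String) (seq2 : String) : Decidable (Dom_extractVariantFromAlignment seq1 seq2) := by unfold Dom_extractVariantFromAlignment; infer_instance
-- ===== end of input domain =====

-- B replaces A's single fused loop with previous-character registers by a separate SNP-counting
-- pass plus a per-sequence run counter that jumps over each maximal '.'-run (alternative
-- decomposition, same cost).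

-- ===== PORT A =====
-- A's loop body; pyGet? is in range for every i the loop visits on inputs admitted by Pre_
-- (Python raises IndexError when seq2 is shorter than seq1 — excluded by Pre_).
def stepA (l1 l2 : List Char) (st : Int × Int × Option Char × Option Char) (i : Int) :
    Int × Int × Option Char × Option Char :=
  let c1 := (PySem.List.pyGet? l1 i).getD ' '
  let c2 := (PySem.List.pyGet? l2 i).getD ' '
  let nbSNPs := if c1 ≠ c2 ∧ c1 ≠ '.' ∧ c2 ≠ '.' then st.1 + 1 else st.1
  let nbInDels := if c1 = '.' ∧ st.2.2.1 ≠ some '.' then st.2.1 + 1 else st.2.1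
  let nbInDels := if c2 = '.' ∧ st.2.2.2 ≠ some '.' then nbInDels + 1 else nbInDels
  (nbSNPs, nbInDels, some c1, some c2)

def extractVariantFromAlignment (seq1 : String) (seq2 : String) : Int × Int :=
  let l1 := seq1.toList
  let l2 := seq2.toList
  let st := (PySem.List.pyRange 0 l1.length 1).foldl (stepA l1 l2) (0, 0, none, none)
  (st.1, st.2.1)

-- ===== PORT B =====
-- inner while of _indelRuns: advance i past the current run of '.'
-- (s[i] is guarded by i < L, so List.getD is exact here; fuel only makes the loop total,
-- it never runs out when started with fuel ≥ len(s))
def skipDots (l : List Char) : Nat → Nat → Nat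
  | 0, i => i
  | f + 1, i => if i < l.length ∧ l.getD i ' ' = '.' then skipDots l f (i + 1) else i

-- outer while of _indelRuns (same fuel device)
def runsGo (l : List Char) : Nat → Nat → Int → Int
  | 0, _, n => n
  | f + 1, i, n =>
    if i < l.length then
      if l.getD i ' ' = '.' then runsGo l f (skipDots l (f + 1) i) (n + 1)
      else runsGo l f (i + 1) n
    else n

-- B's SNP pass body (the genexp over range(len(seq1)))
def stepBsnp (l1 l2 : List Char) (acc : Int) (i : Int) : Int :=
  let c1 := (PySem.List.pyGet? l1 i).getD ' '
  let c2 := (PySem.List.pyGet? l2 i).getD ' '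
  if c1 ≠ c2 ∧ c1 ≠ '.' ∧ c2 ≠ '.' then acc + 1 else acc

def extractVariantFromAlignment_alt (seq1 : String) (seq2 : String) : Int × Int :=
  let l1 := seq1.toList
  let l2 := seq2.toList
  let nbSNPs := (PySem.List.pyRange 0 l1.length 1).foldl (stepBsnp l1 l2) 0
  let s2 := PySem.List.slice l2 none (some (l1.length : Int))
  (nbSNPs, runsGo l1 (l1.length + 1) 0 0 + runsGo s2 (s2.length + 1) 0 0)

-- ===== PRECONDITION & SPEC =====
-- Pre_ excludes exactly the inputs on which A raises IndexError (seq2 shorter than seq1); B raises there too.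
def Pre_extractVariantFromAlignment (seq1 : String) (seq2 : String) : Prop :=
  seq1.toList.length ≤ seq2.toList.length
instance (seq1 : String) (seq2 : String) : Decidable (Pre_extractVariantFromAlignment seq1 seq2) := by
  unfold Pre_extractVariantFromAlignment; infer_instance
def pvWitness_extractVariantFromAlignment : String × String := ("A.TG..A", "ACT...A")

def Spec_extractVariantFromAlignment (seq1 : String) (seq2 : String) (out : Int × Int) : Prop := out = extractVariantFromAlignment_alt seq1 seq2
instance (seq1 : String) (seq2 : String) (out : Int × Int) : Decidable (Spec_extractVariantFromAlignment seq1 seq2 out) := by unfold Spec_extractVariantFromAlignment; infer_instance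

-- ===== CLAIM =====
def Claim_equal_extractVariantFromAlignment : Prop := ∀ (seq1 : String) (seq2 : String), Dom_extractVariantFromAlignment seq1 seq2 → Pre_extractVariantFromAlignment seq1 seq2 → Spec_extractVariantFromAlignment seq1 seq2 (extractVariantFromAlignment seq1 seq2)

-- ===== LEMMAS AND PROOFS =====

-- A's loop body with the two current characters made explicit
def stepC (c1 c2 : Char) (st : Int × Int × Option Char × Option Char) :
    Int × Int × Option Char × Option Char :=
  (if c1 ≠ c2 ∧ c1 ≠ '.' ∧ c2 ≠ '.' then st.1 + 1 else st.1,
   (if c2 = '.' ∧ st.2.2.2 ≠ some '.' then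
      (if c1 = '.' ∧ st.2.2.1 ≠ some '.' then st.2.1 + 1 else st.2.1) + 1
    else (if c1 = '.' ∧ st.2.2.1 ≠ some '.' then st.2.1 + 1 else st.2.1)),
   some c1, some c2)

def loop2 : List Char → List Char → (Int × Int × Option Char × Option Char) →
    (Int × Int × Option Char × Option Char)
  | c1 :: a, c2 :: b, st => loop2 a b (stepC c1 c2 st)
  | _, _, st => st

def runsP : Option Char → List Char → Int
  | _, [] => 0
  | p, c :: r => (if c = '.' ∧ p ≠ some '.' then 1 else 0) + runsP (some c) r

lemma stepA_eq_stepC (p a q b : List Char) (c1 c2 : Char) (st : Int × Int × Option Char × Option Char)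
    (hq : q.length = p.length) :
    stepA (p ++ c1 :: a) (q ++ c2 :: b) st (p.length : Int) = stepC c1 c2 st := by
  have h1 : PySem.List.pyGet? (p ++ c1 :: a) ((p.length : Nat) : Int) = some c1 := by
    rw [PySem.List.pyGet?_natCast]
    simp
  have h2 : PySem.List.pyGet? (q ++ c2 :: b) ((p.length : Nat) : Int) = some c2 := by
    rw [PySem.List.pyGet?_natCast, ← hq]
    simp
  rw [stepA, h1, h2]
  rfl

lemma foldA_loop2 : ∀ (a b p q : List Char) (st : Int × Int × Option Char × Option Char),
    a.length ≤ b.length → q.length = p.length →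
    List.foldl (stepA (p ++ a) (q ++ b)) st
      (PySem.List.pyRange (p.length : Int) ((p.length : Int) + a.length) 1) = loop2 a b st := by
  intro a
  induction a with
  | nil =>
    intro b p q st _ _
    simp [loop2]
  | cons c1 a ih =>
    intro b p q st hlen hq
    cases b with
    | nil => simp at hlen
    | cons c2 b =>
      rw [PySem.List.pyRange_one_cons (by simp only [List.length_cons]; push_cast; omega)]
      rw [List.foldl_cons, stepA_eq_stepC p a q b c1 c2 st hq]
      have hrw : (PySem.List.pyRange ((p.length : Int) + 1) ((p.length : Int) + (c1 :: a).length) 1)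
          = PySem.List.pyRange (((p ++ [c1]).length : Int)) (((p ++ [c1]).length : Int) + a.length) 1 := by
        congr 1
        all_goals (simp only [List.length_append, List.length_cons, List.length_nil]; push_cast; omega)
      rw [hrw]
      have := ih b (p ++ [c1]) (q ++ [c2]) (stepC c1 c2 st)
        (by simpa using Nat.succ_le_succ_iff.mp (by simpa using hlen))
        (by simp [hq])
      simpa [loop2] using this

lemma loop2_char : ∀ (a b : List Char) (st : Int × Int × Option Char × Option Char),
    a.length ≤ b.length →
    (loop2 a b st).1 =
      List.foldl (fun acc p => if p.1 ≠ p.2 ∧ p.1 ≠ '.' ∧ p.2 ≠ '.' then acc + 1 else acc)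
        st.1 (a.zip b) ∧
    (loop2 a b st).2.1 = st.2.1 + runsP st.2.2.1 a + runsP st.2.2.2 (b.take a.length) := by
  intro a
  induction a with
  | nil => intro b st _; simp [loop2, runsP]
  | cons c1 a ih =>
    intro b st hlen
    cases b with
    | nil => simp at hlen
    | cons c2 b =>
      obtain ⟨h1, h2⟩ := ih b (stepC c1 c2 st) (by simpa using Nat.succ_le_succ_iff.mp (by simpa using hlen))
      constructor
      · rw [show loop2 (c1 :: a) (c2 :: b) st = loop2 a b (stepC c1 c2 st) from rfl, h1]
        simp [stepC]
      · rw [show loop2 (c1 :: a) (c2 :: b) st = loop2 a b (stepC c1 c2 st) from rfl, h2]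
        simp only [stepC, List.length_cons, List.take_succ_cons, runsP]
        split_ifs <;> simp_all <;> ring

-- B's SNP fold is the zip fold (same prefix-induction technique as foldA_loop2)
lemma stepBsnp_eq (p a q b : List Char) (c1 c2 : Char) (acc : Int) (hq : q.length = p.length) :
    stepBsnp (p ++ c1 :: a) (q ++ c2 :: b) acc (p.length : Int)
      = (if c1 ≠ c2 ∧ c1 ≠ '.' ∧ c2 ≠ '.' then acc + 1 else acc) := by
  have h1 : PySem.List.pyGet? (p ++ c1 :: a) ((p.length : Nat) : Int) = some c1 := by
    rw [PySem.List.pyGet?_natCast]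
    simp
  have h2 : PySem.List.pyGet? (q ++ c2 :: b) ((p.length : Nat) : Int) = some c2 := by
    rw [PySem.List.pyGet?_natCast, ← hq]
    simp
  rw [stepBsnp, h1, h2]
  simp

lemma foldB_zip : ∀ (a b p q : List Char) (acc : Int),
    a.length ≤ b.length → q.length = p.length →
    List.foldl (stepBsnp (p ++ a) (q ++ b)) acc
      (PySem.List.pyRange (p.length : Int) ((p.length : Int) + a.length) 1)
      = List.foldl (fun acc p => if p.1 ≠ p.2 ∧ p.1 ≠ '.' ∧ p.2 ≠ '.' then acc + 1 else acc)
          acc (a.zip b) := by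
  intro a
  induction a with
  | nil => intro b p q acc _ _; simp
  | cons c1 a ih =>
    intro b p q acc hlen hq
    cases b with
    | nil => simp at hlen
    | cons c2 b =>
      rw [PySem.List.pyRange_one_cons (by simp only [List.length_cons]; push_cast; omega)]
      rw [List.foldl_cons, stepBsnp_eq p a q b c1 c2 acc hq]
      have hrw : (PySem.List.pyRange ((p.length : Int) + 1) ((p.length : Int) + (c1 :: a).length) 1)
          = PySem.List.pyRange (((p ++ [c1]).length : Int)) (((p ++ [c1]).length : Int) + a.length) 1 := by
        congr 1
        all_goals (simp only [List.length_append, List.length_cons, List.length_nil]; push_cast; omega)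
      rw [hrw]
      have := ih b (p ++ [c1]) (q ++ [c2]) (if c1 ≠ c2 ∧ c1 ≠ '.' ∧ c2 ≠ '.' then acc + 1 else acc)
        (by simpa using Nat.succ_le_succ_iff.mp (by simpa using hlen))
        (by simp [hq])
      simpa using this

-- runsP's prev argument only matters through 'is it a dot'
lemma runsP_of_ne (c : Char) (r : List Char) (h : c ≠ '.') :
    runsP (some c) r = runsP none r := by
  cases r with
  | nil => rfl
  | cons d r =>
    simp only [runsP]
    congr 1
    simp [h]

-- after a dot, the rest of the run contributes nothing
lemma runsP_dot (r : List Char) :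
    runsP (some '.') r = runsP none (r.dropWhile (· = '.')) := by
  induction r with
  | nil => rfl
  | cons d r ih =>
    by_cases h : d = '.'
    · subst h
      simpa [runsP, List.dropWhile] using ih
    · simp [runsP, List.dropWhile, h, runsP_of_ne d r h]

-- skipDots never moves left
lemma le_skipDots (l : List Char) (f i : Nat) : i ≤ skipDots l f i := by
  induction f generalizing i with
  | zero => simp [skipDots]
  | succ f ih =>
    rw [skipDots]
    split
    · exact le_trans (by omega) (ih (i + 1))
    · exact le_rfl

-- with enough fuel, skipDots jumps exactly over the leading dots of the suffix
lemma drop_skipDots (l : List Char) (f i : Nat) (hf : l.length ≤ f + i) :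
    l.drop (skipDots l f i) = (l.drop i).dropWhile (· = '.') := by
  induction f generalizing i with
  | zero =>
    rw [skipDots, List.drop_eq_nil_of_le (by omega)]
    rfl
  | succ f ih =>
    rw [skipDots]
    split
    · rename_i h
      obtain ⟨hlt, hdot⟩ := h
      rw [List.getD_eq_getElem l ' ' hlt] at hdot
      have hget : l.drop i = l[i] :: l.drop (i + 1) := List.drop_eq_getElem_cons hlt
      rw [ih (i + 1) (by omega), hget, hdot]
      simp
    · rename_i h
      by_cases hlt : i < l.length
      · have hdot : ¬ l[i] = '.' := fun hc => h ⟨hlt, by rw [List.getD_eq_getElem l ' ' hlt]; exact hc⟩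
        have hget : l.drop i = l[i] :: l.drop (i + 1) := List.drop_eq_getElem_cons hlt
        rw [hget, List.dropWhile_cons]
        simp [hdot]
      · rw [List.drop_eq_nil_of_le (by omega)]
        rfl

-- with enough fuel, the run-skipping loop computes runsP on the remaining suffix
lemma runsGo_eq (l : List Char) (f i : Nat) (n : Int) (hf : l.length ≤ f + i) :
    runsGo l f i n = n + runsP none (l.drop i) := by
  induction f generalizing i n with
  | zero =>
    rw [runsGo, List.drop_eq_nil_of_le (by omega)]
    simp [runsP]
  | succ f ih =>
    rw [runsGo]
    split
    · rename_i hlt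
      have hget : l.drop i = l[i] :: l.drop (i + 1) := List.drop_eq_getElem_cons hlt
      split
      · rename_i hdot
        have hdot' : l[i] = '.' := by rw [← List.getD_eq_getElem l ' ' hlt]; exact hdot
        have hskip : skipDots l (f + 1) i = skipDots l f (i + 1) := by
          rw [skipDots]; exact if_pos ⟨hlt, hdot⟩
        have hj : i + 1 ≤ skipDots l (f + 1) i := hskip ▸ le_skipDots l f (i + 1)
        rw [ih (skipDots l (f + 1) i) (n + 1) (by omega)]
        rw [drop_skipDots l (f + 1) i (by omega), hget, hdot', List.dropWhile_cons]
        simp [runsP, runsP_dot]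
        ring
      · rename_i hdot
        have hdot' : ¬ l[i] = '.' := by rw [← List.getD_eq_getElem l ' ' hlt]; exact hdot
        rw [ih (i + 1) n (by omega), hget]
        simp [runsP, hdot', runsP_of_ne _ _ hdot']
    · rename_i hge
      rw [List.drop_eq_nil_of_le (by omega)]
      simp [runsP]

-- ===== VERDICT (by name: the statement is the Claim_ definition above) =====
theorem extractVariantFromAlignment_spec : Claim_equal_extractVariantFromAlignment := by
  intro seq1 seq2 _ hpre
  unfold Spec_extractVariantFromAlignment extractVariantFromAlignment extractVariantFromAlignment_alt
  have hpre' : seq1.toList.length ≤ seq2.toList.length := hpre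
  have hfoldA := foldA_loop2 seq1.toList seq2.toList [] [] (0, 0, none, none) hpre' rfl
  simp only [List.nil_append, List.length_nil, Nat.cast_zero, zero_add] at hfoldA
  have hfoldB := foldB_zip seq1.toList seq2.toList [] [] 0 hpre' rfl
  simp only [List.nil_append, List.length_nil, Nat.cast_zero, zero_add] at hfoldB
  obtain ⟨h1, h2⟩ := loop2_char seq1.toList seq2.toList (0, 0, none, none) hpre'
  have hslice : PySem.List.slice seq2.toList none (some (seq1.toList.length : Int))
      = seq2.toList.take seq1.toList.length := PySem.List.slice_to_natCast _ _
  simp only [hfoldA, hfoldB, hslice]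
  rw [runsGo_eq _ _ 0 0 (by omega), runsGo_eq _ _ 0 0 (by omega)]
  simp only [List.drop_zero]
  rw [Prod.ext_iff]
  refine ⟨?_, ?_⟩
  · simpa using h1
  · simpa using h2
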